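-- pv_equiv track=rewrite | github.com/kamenetskiy-to/fixer-mcp | client_wires/fixer_wire.py | _overlay_project_mcp_servers
-- ===== SOURCE A (Python) =====
-- def _overlay_project_mcp_servers(
--     base: dict[str, dict[str, object]],
--     overrides: dict[str, dict[str, object]],
-- ) -> dict[str, dict[str, object]]:
--     merged = dict(base)
--     for name, cfg in overrides.items():
--         current = dict(merged.get(name, {}))
--         current.update(cfg)
--         merged[name] = current
--     return merged
-- ===== SOURCE B (Python) =====
-- def _overlay_project_mcp_servers(
--     base: dict[str, dict[str, object]],
--     overrides: dict[str, dict[str, object]],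
-- ) -> dict[str, dict[str, object]]:
--     # Group-by-then-merge: stack each name's config layers (base first, then
--     # override), then flatten every stack into one dict in a second pass.
--     layers: dict[str, list[dict[str, object]]] = {}
--     for name, cfg in (*base.items(), *overrides.items()):
--         layers.setdefault(name, []).append(cfg)
--     return {
--         name: {key: value for cfg in stack for key, value in cfg.items()}
--         for name, stack in layers.items()
--     }
-- ===== Notes on version B (the rewrite author's own statement) =====
-- stated objective: alternative
-- what changed: B replaces A's copy-base-then-get/update mutation loop with a group-by-then-merge pipeline: one pass stacks every name's config layers (base first, then override) into a name->list-of-layers dict, a second pass flattens each stack into the merged dict.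
import Mathlib
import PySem

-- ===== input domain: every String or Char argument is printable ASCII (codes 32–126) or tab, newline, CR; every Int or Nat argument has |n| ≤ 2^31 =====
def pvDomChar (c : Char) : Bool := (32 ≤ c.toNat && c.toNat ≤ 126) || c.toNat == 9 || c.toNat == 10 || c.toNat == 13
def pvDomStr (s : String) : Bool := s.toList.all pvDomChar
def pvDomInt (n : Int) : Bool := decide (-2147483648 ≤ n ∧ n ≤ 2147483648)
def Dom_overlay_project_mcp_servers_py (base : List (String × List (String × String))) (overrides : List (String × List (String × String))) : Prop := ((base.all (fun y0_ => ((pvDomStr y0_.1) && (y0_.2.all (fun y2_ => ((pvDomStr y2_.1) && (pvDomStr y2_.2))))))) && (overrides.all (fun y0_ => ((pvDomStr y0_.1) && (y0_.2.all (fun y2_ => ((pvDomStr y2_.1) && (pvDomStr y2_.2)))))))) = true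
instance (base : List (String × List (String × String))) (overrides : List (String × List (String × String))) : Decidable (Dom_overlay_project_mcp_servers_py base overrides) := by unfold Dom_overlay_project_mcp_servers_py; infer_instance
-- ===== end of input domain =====

-- ===== PORT A =====
-- B replaces A's copy-base-then-get/update mutation loop with a two-stage group-by-then-merge
-- pipeline; return-value equivalence only (A aliases untouched base inner dicts, B rebuilds them).
def overlay_project_mcp_servers_py (base : List (String × List (String × String))) (overrides : List (String × List (String × String))) : List (String × List (String × String)) :=
  (overrides.foldl
    (fun merged p =>
      let current := PySem.Dict.ofList (merged.getD p.1 [])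
      let current := p.2.foldl (fun c kv => c.insert kv.1 kv.2) current
      merged.insert p.1 current.items)
    (PySem.Dict.mk base)).items

-- ===== PORT B =====
-- stage 1: 'layers.setdefault(name, []).append(cfg)' over base's then overrides' items
--          (ported as Dict.modify with default [], exact for Python's setdefault/append);
-- stage 2: '{k: v for cfg in stack for k, v in cfg.items()}' = Dict.ofList of the flattened stack
def overlay_project_mcp_servers_py_alt (base : List (String × List (String × String))) (overrides : List (String × List (String × String))) : List (String × List (String × String)) :=
  ((base ++ overrides).foldl
      (fun layers p => layers.modify p.1 [] (fun stack => stack ++ [p.2]))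
      (PySem.Dict.empty : PySem.Dict String (List (List (String × String))))).items.map
    (fun q => (q.1, (PySem.Dict.ofList q.2.flatten).items))

-- ===== PRECONDITION & SPEC =====
-- Pre_ excludes association lists that do not represent Python dicts — duplicate keys in either
-- outer list or in an inner list of base: A's arguments are dicts, so it never receives them.
def Pre_overlay_project_mcp_servers_py (base : List (String × List (String × String))) (overrides : List (String × List (String × String))) : Prop :=
  (base.map Prod.fst).Nodup ∧ (overrides.map Prod.fst).Nodup ∧ ∀ p ∈ base, (p.2.map Prod.fst).Nodup
instance (base : List (String × List (String × String))) (overrides : List (String × List (String × String))) : Decidable (Pre_overlay_project_mcp_servers_py base overrides) := by unfold Pre_overlay_project_mcp_servers_py; infer_instance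

def pvWitness_overlay_project_mcp_servers_py : (List (String × List (String × String))) × (List (String × List (String × String))) :=
  ([("a", [("x", "1"), ("y", "2")]), ("b", [("z", "3")])],
   [("a", [("x", "9")]), ("c", [("w", "4")])])

def Spec_overlay_project_mcp_servers_py (base : List (String × List (String × String))) (overrides : List (String × List (String × String))) (out : List (String × List (String × String))) : Prop := out = overlay_project_mcp_servers_py_alt base overrides
instance (base : List (String × List (String × String))) (overrides : List (String × List (String × String))) (out : List (String × List (String × String))) : Decidable (Spec_overlay_project_mcp_servers_py base overrides out) := by unfold Spec_overlay_project_mcp_servers_py; infer_instance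

-- ===== CLAIM (what is proved, stated in full; the proofs are below) =====
def Claim_equal_overlay_project_mcp_servers_py : Prop := ∀ (base : List (String × List (String × String))) (overrides : List (String × List (String × String))), Dom_overlay_project_mcp_servers_py base overrides → Pre_overlay_project_mcp_servers_py base overrides → Spec_overlay_project_mcp_servers_py base overrides (overlay_project_mcp_servers_py base overrides)

-- ===== LEMMAS AND PROOFS =====

-- {**b, **o} as an items list: the common normal form both ports are reduced to
def pvMergeInner (b o : List (String × String)) : List (String × String) :=
  (o.foldl (fun c kv => c.insert kv.1 kv.2) (PySem.Dict.ofList b)).items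

-- the normal form: base keys in order (merged where overridden), then override-only keys
def pvNormal (base overrides : List (String × List (String × String))) : List (String × List (String × String)) :=
  base.map (fun p => (p.1, match (PySem.Dict.mk overrides).get? p.1 with
        | some o => pvMergeInner p.2 o
        | none => p.2))
  ++ (overrides.filter (fun q => !(PySem.Dict.mk base).contains q.1)).map
      (fun q => (q.1, (PySem.Dict.ofList q.2).items))

-- keys absent from a list give none lookups
theorem pv_get?_mk_none (l : List (String × List (String × String))) (n : String)
    (h : n ∉ l.map Prod.fst) : (PySem.Dict.mk l).get? n = none := by
  rw [PySem.Dict.get?_eq_none_iff_contains, PySem.Dict.contains_eq_decide_mem_keys]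
  simp [PySem.Dict.keys_mk, h]

-- ===== A-side: the get/update fold equals the normal form =====
theorem pv_fold (ov : List (String × List (String × String)))
    (d : PySem.Dict String (List (String × String)))
    (hd : d.keys.Nodup) (hov : (ov.map Prod.fst).Nodup) :
    (ov.foldl (fun merged p =>
      let current := PySem.Dict.ofList (merged.getD p.1 [])
      let current := p.2.foldl (fun c kv => c.insert kv.1 kv.2) current
      merged.insert p.1 current.items) d).items =
    d.items.map (fun p => (p.1, match (PySem.Dict.mk ov).get? p.1 with
          | some o => pvMergeInner p.2 o
          | none => p.2))
    ++ (ov.filter (fun q => !d.contains q.1)).map (fun q => (q.1, (PySem.Dict.ofList q.2).items)) := by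
  induction ov generalizing d with
  | nil => simp [PySem.Dict.get?]
  | cons hdp rest ih =>
    obtain ⟨n, cfg⟩ := hdp
    simp only [List.map_cons, List.nodup_cons] at hov
    obtain ⟨hn, hrest⟩ := hov
    simp only [List.foldl_cons]
    rw [ih _ (PySem.Dict.nodup_keys_insert _ _ _ hd) hrest]
    by_cases hc : d.contains n = true
    · -- n already present: insert overwrites in place
      rw [PySem.Dict.items_insert_of_contains d _ hc]
      rw [List.map_map]
      have hmap : ∀ p ∈ d.items,
          ((fun p => (p.1, match (PySem.Dict.mk rest).get? p.1 with
              | some o => pvMergeInner p.2 o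
              | none => p.2)) ∘ (fun p => if (p.1 == n) = true then (n,
                (cfg.foldl (fun c kv => c.insert kv.1 kv.2)
                  (PySem.Dict.ofList (d.getD n []))).items) else p)) p =
          (fun p => (p.1, match (PySem.Dict.mk ((n, cfg) :: rest)).get? p.1 with
              | some o => pvMergeInner p.2 o
              | none => p.2)) p := by
        intro p hp
        by_cases hpn : p.1 = n
        · simp only [Function.comp, hpn, beq_self_eq_true, if_true,
            PySem.Dict.get?_mk_cons, pv_get?_mk_none rest n hn]
          have : d.getD n [] = p.2 := by
            have := PySem.Dict.getD_of_mem_items d (k := p.1) (v := p.2) (by simpa using hp) hd []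
            rwa [hpn] at this
          simp [this, pvMergeInner]
        · simp [Function.comp, show (p.1 == n) = false by simpa using hpn,
            PySem.Dict.get?_mk_cons, show (n == p.1) = false by simp [Ne.symm hpn]]
      rw [List.map_congr_left hmap]
      have hfilt : (rest.filter (fun q => !(d.insert n
            ((cfg.foldl (fun c kv => c.insert kv.1 kv.2)
              (PySem.Dict.ofList (d.getD n []))).items)).contains q.1)) =
          (((n, cfg) :: rest).filter (fun q => !d.contains q.1)) := by
        rw [List.filter_cons_of_neg (by simp [hc])]
        apply List.filter_congr
        intro q hq
        have hqn : q.1 ≠ n := by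
          intro h; exact hn (h ▸ List.mem_map_of_mem hq)
        rw [PySem.Dict.contains_insert]
        simp [hqn]
      rw [hfilt]
    · -- n fresh: insert appends
      rw [PySem.Dict.items_insert_of_not_contains d _ (by simpa using hc)]
      rw [List.map_append]
      have hmap : ∀ p ∈ d.items,
          (fun p => (p.1, match (PySem.Dict.mk rest).get? p.1 with
              | some o => pvMergeInner p.2 o
              | none => p.2)) p =
          (fun p => (p.1, match (PySem.Dict.mk ((n, cfg) :: rest)).get? p.1 with
              | some o => pvMergeInner p.2 o
              | none => p.2)) p := by
        intro p hp
        have hpn : p.1 ≠ n := by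
          intro h
          apply hc
          rw [← h]
          exact (PySem.Dict.contains_iff_mem_keys d p.1).mpr
            (by simpa [PySem.Dict.keys] using List.mem_map_of_mem (f := Prod.fst) hp)
        simp [PySem.Dict.get?_mk_cons, show (n == p.1) = false by simp [Ne.symm hpn]]
      rw [List.map_congr_left hmap]
      have hfilt : (rest.filter (fun q => !(d.insert n
            ((cfg.foldl (fun c kv => c.insert kv.1 kv.2)
              (PySem.Dict.ofList (d.getD n []))).items)).contains q.1)) =
          (rest.filter (fun q => !d.contains q.1)) := by
        apply List.filter_congr
        intro q hq
        have hqn : q.1 ≠ n := by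
          intro h; exact hn (h ▸ List.mem_map_of_mem hq)
        rw [PySem.Dict.contains_insert]
        simp [hqn]
      rw [hfilt, List.filter_cons_of_pos (by simp [hc])]
      have hd0 : d.getD n [] = [] := PySem.Dict.getD_of_not_contains d [] (by simpa using hc)
      have hof : (cfg.foldl (fun c kv => c.insert kv.1 kv.2)
          (PySem.Dict.ofList ([] : List (String × String)))).items = (PySem.Dict.ofList cfg).items := rfl
      simp [pv_get?_mk_none rest n hn, hd0, hof]

-- ===== B-side helper lemmas =====
theorem pv_filter_key_nil (l : List (String × List (String × String))) (k : String)
    (h : k ∉ l.map Prod.fst) : l.filter (fun p => p.1 == k) = [] := by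
  rw [List.filter_eq_nil_iff]
  intro p hp
  simp only [beq_iff_eq]
  intro e
  exact h (e ▸ List.mem_map_of_mem (f := Prod.fst) hp)

-- with unique keys, the per-key filter collects the (unique) entry — i.e. the dict lookup
theorem pv_filter_get (l : List (String × List (String × String))) (k : String)
    (h : (l.map Prod.fst).Nodup) :
    (l.filter (fun p => p.1 == k)).map (·.2) = ((PySem.Dict.mk l).get? k).toList := by
  induction l with
  | nil => simp [PySem.Dict.get?]
  | cons a t ih =>
    simp only [List.map_cons, List.nodup_cons] at h
    rw [PySem.Dict.get?_mk_cons, List.filter_cons]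
    by_cases hk : a.1 = k
    · rw [pv_filter_key_nil t k (hk ▸ h.1)]
      simp [hk]
    · have : (a.1 == k) = false := by simpa using hk
      simp [this, ih h.2]

-- rebuilding a duplicate-free association list as a dict is the identity
theorem pv_items_ofList (l : List (String × String)) (h : (l.map Prod.fst).Nodup) :
    (PySem.Dict.ofList l).items = l := by
  have := PySem.Dict.items_foldl_insert_fresh l Prod.fst Prod.snd PySem.Dict.empty
    (by intro a _; simp) h
  simpa using this

theorem pv_merge (b o : List (String × String)) :
    (PySem.Dict.ofList (b ++ o)).items = pvMergeInner b o := by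
  show ((b ++ o).foldl (fun d kv => d.insert kv.1 kv.2) PySem.Dict.empty).items = _
  rw [List.foldl_append]
  rfl

-- ===== B-side: the group-then-merge pipeline equals the normal form =====
theorem pv_alt (base ov : List (String × List (String × String)))
    (h1 : (base.map Prod.fst).Nodup) (h2 : (ov.map Prod.fst).Nodup)
    (h3 : ∀ p ∈ base, (p.2.map Prod.fst).Nodup) :
    overlay_project_mcp_servers_py_alt base ov = pvNormal base ov := by
  unfold overlay_project_mcp_servers_py_alt
  have hnd : ((base ++ ov).foldl
      (fun layers p => layers.modify p.1 [] (fun stack => stack ++ [p.2]))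
      (PySem.Dict.empty : PySem.Dict String (List (List (String × String))))).keys.Nodup :=
    PySem.Dict.nodup_keys_foldl_modify_key (base ++ ov) Prod.fst []
      (fun _ p stack => stack ++ [p.2]) PySem.Dict.empty (by simp)
  rw [PySem.Dict.items_eq_map_keys _ hnd []]
  have hG : ∀ k, ((base ++ ov).foldl
      (fun layers p => layers.modify p.1 [] (fun stack => stack ++ [p.2]))
      (PySem.Dict.empty : PySem.Dict String (List (List (String × String))))).getD k [] =
      ((PySem.Dict.mk base).get? k).toList ++ ((PySem.Dict.mk ov).get? k).toList := by
    intro k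
    rw [PySem.Dict.getD_foldl_modify_append]
    rw [List.filter_append, List.map_append, pv_filter_get base k h1, pv_filter_get ov k h2]
    simp
  have hkeys : ((base ++ ov).foldl
      (fun layers p => layers.modify p.1 [] (fun stack => stack ++ [p.2]))
      (PySem.Dict.empty : PySem.Dict String (List (List (String × String))))).keys =
      base.map Prod.fst ++ (ov.map Prod.fst).filter (fun y => !PySem.Set.contains (base.map Prod.fst) y) := by
    rw [PySem.Dict.keys_foldl_modify_key (base ++ ov) Prod.fst []
      (fun _ p stack => stack ++ [p.2]) PySem.Dict.empty]
    rw [PySem.Dict.keys_empty, PySem.Set.update_nil_left, List.map_append,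
      PySem.Set.ofList_append, PySem.Set.update_eq_append_filter,
      PySem.Set.ofList_eq_self_of_nodup _ h1, PySem.Set.ofList_eq_self_of_nodup _ h2]
  rw [hkeys, List.map_append, List.map_append, List.map_map, List.map_map]
  unfold pvNormal
  congr 1
  · -- base keys
    apply List.map_congr_left
    intro p hp
    have hget : (PySem.Dict.mk base).get? p.1 = some p.2 :=
      PySem.Dict.get?_of_mem_items (PySem.Dict.mk base) (by simpa using hp)
        (by simpa [PySem.Dict.keys_mk] using h1)
    simp only [Function.comp_apply, hG, hget]
    cases hov : (PySem.Dict.mk ov).get? p.1 with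
    | none => simp [pv_items_ofList p.2 (h3 p hp)]
    | some o => simp [pv_merge]
  · -- override-only keys
    rw [List.filter_map]
    have hfe : (ov.filter ((fun y => !PySem.Set.contains (base.map Prod.fst) y) ∘ Prod.fst)) =
        (ov.filter (fun q => !(PySem.Dict.mk base).contains q.1)) := by
      apply List.filter_congr
      intro q _
      simp [PySem.Dict.contains_eq_decide_mem_keys, PySem.Dict.keys_mk]
    rw [hfe, List.map_map, List.map_map]
    apply List.map_congr_left
    intro q hq
    rw [List.mem_filter] at hq
    have hnotb : q.1 ∉ base.map Prod.fst := by
      intro hmem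
      have := hq.2
      rw [PySem.Dict.contains_eq_decide_mem_keys] at this
      simp [PySem.Dict.keys_mk, hmem] at this
    have hgo : (PySem.Dict.mk ov).get? q.1 = some q.2 :=
      PySem.Dict.get?_of_mem_items (PySem.Dict.mk ov) (by simpa using hq.1)
        (by simpa [PySem.Dict.keys_mk] using h2)
    simp only [Function.comp_apply]
    rw [hG, pv_get?_mk_none base q.1 hnotb, hgo]
    simp

-- ===== VERDICT (by name: the statement is the Claim_ definition above) =====
theorem overlay_project_mcp_servers_py_spec : Claim_equal_overlay_project_mcp_servers_py := by
  intro base overrides _ hpre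
  unfold Spec_overlay_project_mcp_servers_py
  rw [pv_alt base overrides hpre.1 hpre.2.1 hpre.2.2]
  unfold overlay_project_mcp_servers_py pvNormal
  rw [pv_fold overrides (PySem.Dict.mk base)
    (by simpa [PySem.Dict.keys_mk] using hpre.1) hpre.2.1]
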